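-- pv_equiv track=rewrite | github.com/SimBe195/AdventOfCode | 2025/day_06/main.py | parse_problems_2
-- ===== SOURCE A (Python) =====
-- def parse_problems_2(problem_str: str) -> tuple[list[list[int]], list[str]]:
--     op_list = list(problem_str.splitlines()[-1].split())
--
--     n_cols = len(problem_str.split("\n", maxsplit=1)[0])
--     lines = problem_str.splitlines()[:-1]
--
--     num_matrix = []
--     current_nums = []
--     for col in range(n_cols):
--         if all(line[col] == " " for line in lines):
--             num_matrix.append(current_nums)
--             current_nums = []
--             continue
--         num_str = ""
--         for line in lines:
--             if line[col] != " ":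
--                 num_str += line[col]
--         current_nums.append(int(num_str))
--     num_matrix.append(current_nums)
--
--     return num_matrix, op_list
-- ===== SOURCE B (Python) =====
-- def parse_problems_2(problem_str: str) -> tuple[list[list[int]], list[str]]:
--     lines = problem_str.splitlines()
--     op_list = lines[-1].split()
--     n_cols = len(problem_str.split("\n", 1)[0])
--     # single row-major sweep: accumulate each column's non-space chars into buffers
--     buf = [""] * n_cols
--     for line in lines[:-1]:
--         buf = [b + line[c] if line[c] != " " else b for c, b in enumerate(buf)]
--     # then split the buffer sequence into groups at empty (all-space) columns
--     groups = [[]]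
--     for s in buf:
--         if s:
--             groups[-1].append(int(s))
--         else:
--             groups.append([])
--     return groups, op_list
-- ===== Notes on version B (the rewrite author's own statement) =====
-- stated objective: alternative
-- what changed: A scans the grid column-major, re-reading every line twice per column (blank test via all(), then digit assembly by string concatenation); B makes one row-major sweep that accumulates per-column digit buffers as each line is read once, then splits the buffer sequence into groups at empty buffers, so the loop nesting is inverted and the per-column blank test becomes an emptiness check.
import Mathlib
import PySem

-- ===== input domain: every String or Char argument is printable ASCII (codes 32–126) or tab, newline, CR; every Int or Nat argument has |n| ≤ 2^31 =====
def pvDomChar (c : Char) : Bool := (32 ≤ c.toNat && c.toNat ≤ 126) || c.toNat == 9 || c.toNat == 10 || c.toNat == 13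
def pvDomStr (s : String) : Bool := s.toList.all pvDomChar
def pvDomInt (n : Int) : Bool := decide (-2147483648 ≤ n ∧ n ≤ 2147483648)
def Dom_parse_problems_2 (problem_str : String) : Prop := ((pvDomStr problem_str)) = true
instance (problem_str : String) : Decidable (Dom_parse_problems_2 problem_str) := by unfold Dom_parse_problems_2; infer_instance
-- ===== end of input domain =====

-- B replaces A's column-major double scan with one row-major sweep that accumulates per-column
-- digit buffers, then groups the buffers; alternative decomposition, same asymptotic cost.


-- ===== PORT A =====
-- literal transliteration of A: for each column index, test 'all lines blank at col',
-- else accumulate the non-space chars over the lines and int() them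
def parse_problems_2 (problem_str : String) : List (List Int) × List String :=
  let op_list : List String :=
    match PySem.List.pyGet? (PySem.Str.splitlines problem_str) (-1) with
    | some last => PySem.Str.split₀ last
    | none => []  -- IndexError in Python; excluded by Pre_
  let n_cols : Int :=
    match PySem.Str.splitMax? problem_str "\n" 1 with
    | some parts => PySem.Str.len (parts.getD 0 "")
    | none => 0
  let lines := PySem.List.slice (PySem.Str.splitlines problem_str) none (some (-1))
  let p :=
    (PySem.List.pyRange 0 n_cols 1).foldl
      (fun (st : List (List Int) × List Int) col =>
        if lines.all (fun line => PySem.Str.pyGet? line col == some ' ') then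
          (st.1 ++ [st.2], [])
        else
          let num_str : List Char :=
            lines.foldl
              (fun acc line =>
                match PySem.Str.pyGet? line col with
                | some c => if c ≠ ' ' then acc ++ [c] else acc
                | none => acc)  -- IndexError in Python; excluded by Pre_
              []
          match PySem.Int.ofChars? num_str with
          | some v => (st.1, st.2 ++ [v])
          | none => st)  -- ValueError in Python; excluded by Pre_
      ([], [])
  (p.1 ++ [p.2], op_list)

-- ===== PORT B =====
-- literal transliteration of B: one row-major sweep accumulating per-column buffers
-- (buf = [""] * n_cols; per line a comprehension over enumerate(buf)), then a grouping
-- pass over the buffers splitting at empty ones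
def parse_problems_2_alt (problem_str : String) : List (List Int) × List String :=
  let lines := PySem.Str.splitlines problem_str
  let op_list : List String :=
    match PySem.List.pyGet? lines (-1) with
    | some last => PySem.Str.split₀ last
    | none => []  -- IndexError in Python; excluded by Pre_
  let n_cols : Int :=
    match PySem.Str.splitMax? problem_str "\n" 1 with
    | some parts => PySem.Str.len (parts.getD 0 "")
    | none => 0
  let rows := PySem.List.slice lines none (some (-1))
  let buf : List (List Char) :=
    rows.foldl
      (fun (buf : List (List Char)) line =>
        (PySem.List.enumerate buf 0).map (fun cb =>
          match PySem.Str.pyGet? line cb.1 with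
          | some ch => if ch ≠ ' ' then cb.2 ++ [ch] else cb.2
          | none => cb.2))  -- IndexError in Python; excluded by Pre_
      (PySem.List.pyRepeat [[]] n_cols)
  let groups : List (List Int) :=
    buf.foldl
      (fun (g : List (List Int)) s =>
        if s.isEmpty then g ++ [[]]
        else
          match PySem.Int.ofChars? s with
          | some v => g.dropLast ++ [g.getLastD [] ++ [v]]
          | none => g)  -- ValueError in Python; excluded by Pre_
      [[]]
  (groups, op_list)

-- ===== PRECONDITION & SPEC =====
-- the chars of column c of the grid (short lines contribute nothing), used only to state Pre_
def pvColChars (rows : List String) (c : Int) : List Char :=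
  rows.filterMap (fun line => PySem.Str.pyGet? line c)

-- Pre_ = exactly the inputs on which Python A returns: the string is nonempty as a line list
-- (else lines[-1] raises IndexError), every line but the last is at least as long as the first
-- raw line (else line[col] raises IndexError), and every column that is not all spaces parses
-- as an int once spaces are removed (else int(num_str) raises ValueError).
def Pre_parse_problems_2 (problem_str : String) : Prop :=
  PySem.Str.splitlines problem_str ≠ [] ∧
  (let n_cols : Int :=
    match PySem.Str.splitMax? problem_str "\n" 1 with
    | some parts => PySem.Str.len (parts.getD 0 "")
    | none => 0
   let rows := PySem.List.slice (PySem.Str.splitlines problem_str) none (some (-1))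
   (∀ line ∈ rows, n_cols ≤ PySem.Str.len line) ∧
   ∀ c ∈ PySem.List.pyRange 0 n_cols 1,
     (pvColChars rows c).all (fun ch => ch == ' ') = true ∨
     (PySem.Int.ofChars? ((pvColChars rows c).filter (fun ch => ch ≠ ' '))).isSome = true)
instance (problem_str : String) : Decidable (Pre_parse_problems_2 problem_str) := by
  unfold Pre_parse_problems_2; infer_instance

def pvWitness_parse_problems_2 : String := "1 2\n+ *"

def Spec_parse_problems_2 (problem_str : String) (out : List (List Int) × List String) : Prop := out = parse_problems_2_alt problem_str
instance (problem_str : String) (out : List (List Int) × List String) : Decidable (Spec_parse_problems_2 problem_str out) := by unfold Spec_parse_problems_2; infer_instance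

-- ===== CLAIM (what is proved, stated in full; the proofs are below) =====
def Claim_equal_parse_problems_2 : Prop := ∀ (problem_str : String), Dom_parse_problems_2 problem_str → Pre_parse_problems_2 problem_str → Spec_parse_problems_2 problem_str (parse_problems_2 problem_str)

-- ===== LEMMAS AND PROOFS =====

-- A's num_str fold is the space-filtered column
theorem pv_fold_filter (f : String → Option Char) :
    ∀ (rows : List String) (acc : List Char),
      rows.foldl
        (fun a line => match f line with
          | some c => if c ≠ ' ' then a ++ [c] else a
          | none => a) acc
        = acc ++ (rows.filterMap f).filter (fun ch => ch ≠ ' ') := by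
  intro rows
  induction rows with
  | nil => intro acc; simp
  | cons l t ih =>
    intro acc
    rw [List.foldl_cons, ih, List.filterMap_cons]
    cases h : f l with
    | none => simp
    | some c => by_cases hc : c = ' ' <;> simp [hc]

-- A's blank test agrees with 'the filtered column is empty' when every line is long enough
theorem pv_all_blank (f : String → Option Char) :
    ∀ (rows : List String), (∀ l ∈ rows, (f l).isSome) →
      rows.all (fun line => f line == some ' ')
        = ((rows.filterMap f).filter (fun ch => ch ≠ ' ')).isEmpty := by
  intro rows
  induction rows with
  | nil => simp
  | cons l t ih =>
    intro h
    obtain ⟨c, hc⟩ := Option.isSome_iff_exists.mp (h l (by simp))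
    by_cases hsp : c = ' '
    · subst hsp; simp [hc, ih (fun x hx => h x (by simp [hx]))]
    · simp [hc, hsp]

-- enumerating a list mapped over its own enumeration keeps the indices aligned
theorem pv_enum_map {α β : Type} (f : Int × α → β) :
    ∀ (l : List α) (s : Int),
      PySem.List.enumerate ((PySem.List.enumerate l s).map f) s
        = (PySem.List.enumerate l s).map (fun p => (p.1, f p)) := by
  intro l
  induction l with
  | nil => intro s; simp [PySem.List.enumerate_nil]
  | cons x t ih =>
    intro s
    simp [PySem.List.enumerate_cons, ih (s + 1)]

-- the row-major sweep produces, per buffer slot, the slot's old content followed by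
-- that column's non-space chars
theorem pv_sweep :
    ∀ (rows : List String) (buf0 : List (List Char)),
      rows.foldl
        (fun (buf : List (List Char)) line =>
          (PySem.List.enumerate buf 0).map (fun cb =>
            match PySem.Str.pyGet? line cb.1 with
            | some ch => if ch ≠ ' ' then cb.2 ++ [ch] else cb.2
            | none => cb.2))
        buf0
      = (PySem.List.enumerate buf0 0).map
          (fun p => p.2 ++ (pvColChars rows p.1).filter (fun ch => ch ≠ ' ')) := by
  intro rows
  induction rows with
  | nil =>
    intro buf0
    simp [pvColChars, PySem.List.map_snd_enumerate]
  | cons line t ih =>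
    intro buf0
    rw [List.foldl_cons, ih, pv_enum_map]
    rw [List.map_map]
    apply List.map_congr_left
    intro p _
    simp only [Function.comp, pvColChars, List.filterMap_cons]
    cases h : PySem.Str.pyGet? line p.1 with
    | none => simp
    | some c => by_cases hc : c = ' ' <;> simp [hc]

-- the main fold correspondence: B's grouping fold over the filtered column buffers computes
-- A's (matrix, current) fold, under the invariant groups = matrix ++ [current]
theorem pv_main (rows : List String) :
    ∀ (L : List Int) (m : List (List Int)) (cur : List Int),
      (∀ c ∈ L, ∀ l ∈ rows, (PySem.Str.pyGet? l c).isSome) →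
      (L.map (fun c => (pvColChars rows c).filter (fun ch => ch ≠ ' '))).foldl
        (fun (g : List (List Int)) s =>
          if s.isEmpty then g ++ [[]]
          else
            match PySem.Int.ofChars? s with
            | some v => g.dropLast ++ [g.getLastD [] ++ [v]]
            | none => g)
        (m ++ [cur])
      = (fun (p : List (List Int) × List Int) => p.1 ++ [p.2])
          (L.foldl
            (fun (st : List (List Int) × List Int) col =>
              if rows.all (fun line => PySem.Str.pyGet? line col == some ' ') then
                (st.1 ++ [st.2], [])
              else
                match PySem.Int.ofChars?
                    (rows.foldl
                      (fun acc line =>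
                        match PySem.Str.pyGet? line col with
                        | some c => if c ≠ ' ' then acc ++ [c] else acc
                        | none => acc) []) with
                | some v => (st.1, st.2 ++ [v])
                | none => st)
            (m, cur)) := by
  intro L
  induction L with
  | nil => intro m cur _; simp
  | cons c t ih =>
    intro m cur h
    have hc : ∀ l ∈ rows, (PySem.Str.pyGet? l c).isSome := h c (by simp)
    have ht : ∀ c' ∈ t, ∀ l ∈ rows, (PySem.Str.pyGet? l c').isSome :=
      fun c' hc' => h c' (by simp [hc'])
    have hnum :
        rows.foldl
          (fun acc line =>
            match PySem.Str.pyGet? line c with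
            | some ch => if ch ≠ ' ' then acc ++ [ch] else acc
            | none => acc) []
        = (pvColChars rows c).filter (fun ch => ch ≠ ' ') :=
      pv_fold_filter _ rows []
    have hblank := pv_all_blank (fun line => PySem.Str.pyGet? line c) rows hc
    simp only [List.map_cons, List.foldl_cons, hnum, hblank, pvColChars]
    by_cases hb :
        ((rows.filterMap (fun line => PySem.Str.pyGet? line c)).filter
          (fun ch => ch ≠ ' ')).isEmpty = true
    · rw [if_pos hb, if_pos hb]
      exact ih (m ++ [cur]) [] ht
    · rw [if_neg hb, if_neg hb]
      cases hv : PySem.Int.ofChars?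
          ((rows.filterMap (fun line => PySem.Str.pyGet? line c)).filter (fun ch => ch ≠ ' ')) with
      | none =>
        exact ih m cur ht
      | some v =>
        have h1 : (m ++ [cur]).dropLast = m := by simp
        have h2 : (m ++ [cur]).getLastD [] = cur := by simp
        rw [h1, h2]
        exact ih m (cur ++ [v]) ht

-- bridge: the buffers B sweeps out are exactly the filtered columns, indexed by the range
theorem pv_bridge (rows : List String) (n_cols : Int) (hnn : 0 ≤ n_cols)
    (hlen : ∀ line ∈ rows, n_cols ≤ PySem.Str.len line) :
    (rows.foldl
        (fun (buf : List (List Char)) line =>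
          (PySem.List.enumerate buf 0).map (fun cb =>
            match PySem.Str.pyGet? line cb.1 with
            | some ch => if ch ≠ ' ' then cb.2 ++ [ch] else cb.2
            | none => cb.2))
        (PySem.List.pyRepeat [[]] n_cols)).foldl
      (fun (g : List (List Int)) s =>
        if s.isEmpty then g ++ [[]]
        else
          match PySem.Int.ofChars? s with
          | some v => g.dropLast ++ [g.getLastD [] ++ [v]]
          | none => g)
      [[]]
    = (fun (p : List (List Int) × List Int) => p.1 ++ [p.2])
        ((PySem.List.pyRange 0 n_cols 1).foldl
          (fun (st : List (List Int) × List Int) col =>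
            if rows.all (fun line => PySem.Str.pyGet? line col == some ' ') then
              (st.1 ++ [st.2], [])
            else
              match PySem.Int.ofChars?
                  (rows.foldl
                    (fun acc line =>
                      match PySem.Str.pyGet? line col with
                      | some c => if c ≠ ' ' then acc ++ [c] else acc
                      | none => acc) []) with
              | some v => (st.1, st.2 ++ [v])
              | none => st)
          ([], [])) := by
  have h : ∀ c ∈ PySem.List.pyRange 0 n_cols 1, ∀ l ∈ rows, (PySem.Str.pyGet? l c).isSome := by
    intro c hcmem l hl
    have hcb := PySem.List.mem_pyRange_one.mp hcmem
    have hlenl := hlen l hl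
    rw [← Option.ne_none_iff_isSome]
    intro hnone
    rw [PySem.Str.pyGet?_eq] at hnone
    have hni := (PySem.List.pyGet?_eq_none_iff _ _).mp hnone
    apply hni
    have hl2 : (PySem.Str.len l) = (l.toList.length : Int) := by simp
    constructor
    · have h0 : (0:Int) ≤ c := hcb.1
      omega
    · omega
  rw [pv_sweep]
  have hrep : PySem.List.pyRepeat ([[]] : List (List Char)) n_cols
      = List.replicate n_cols.toNat [] := PySem.List.pyRepeat_singleton _ _
  have henum : (PySem.List.enumerate (List.replicate n_cols.toNat ([] : List Char)) 0).map
      (fun p => p.2 ++ (pvColChars rows p.1).filter (fun ch => ch ≠ ' '))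
      = (PySem.List.pyRange 0 n_cols 1).map
          (fun c => (pvColChars rows c).filter (fun ch => ch ≠ ' ')) := by
    rw [PySem.List.enumerate_eq_map_pyRange (d := ([] : List Char)), List.map_map]
    have hlen' : (PySem.List.len (List.replicate n_cols.toNat ([] : List Char))) = n_cols := by
      simp; omega
    rw [hlen']
    apply List.map_congr_left
    intro c hcmem
    have hcb := PySem.List.mem_pyRange_one.mp hcmem
    simp only [Function.comp]
    have : PySem.List.pyGetD (List.replicate n_cols.toNat ([] : List Char)) c [] = [] := by
      have : ∀ x ∈ List.replicate n_cols.toNat ([] : List Char), x = ([] : List Char) := by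
        intro x hx; exact List.eq_of_mem_replicate hx
      rcases hg : PySem.List.pyGet? (List.replicate n_cols.toNat ([] : List Char)) c with _ | v
      · simp [PySem.List.pyGetD, hg]
      · have := this v (PySem.List.mem_of_pyGet?_eq_some _ hg)
        simp [PySem.List.pyGetD, hg, this]
    simp [this]
  rw [hrep, henum]
  exact pv_main rows (PySem.List.pyRange 0 n_cols 1) [] [] h

-- ===== VERDICT (by name: the statement is the Claim_ definition above) =====
theorem parse_problems_2_spec : Claim_equal_parse_problems_2 := by
  intro s _hdom hpre
  simp only [Pre_parse_problems_2] at hpre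
  obtain ⟨_hne, hlen, _hparse⟩ := hpre
  simp only [Spec_parse_problems_2, parse_problems_2, parse_problems_2_alt]
  refine Prod.ext ?_ rfl
  have hnn : (0:Int) ≤ (match PySem.Str.splitMax? s "\n" 1 with
    | some parts => PySem.Str.len (parts.getD 0 "")
    | none => 0) := by
    cases h : PySem.Str.splitMax? s "\n" 1 <;> simp
  rw [pv_bridge _ _ hnn hlen]
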